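-- pv_equiv track=rewrite | github.com/JakeSaunders1995/comp16321MarkingMid | CW_encrypt/decrypt_r89835eb/decrypt_r89835eb.py | splitHex
-- ===== SOURCE A (Python) =====
-- def splitHex(hex):
-- 	newHex = ""
-- 	for index,hexDigit in enumerate(hex):
-- 		temp = int(hexDigit, 16)
-- 		temp = bin(temp)
-- 		temp = str(temp)[2:]
-- 		missing_zeros = 4 - len(temp)
-- 		temp = ("0"*missing_zeros) + temp
-- 		newHex += temp
-- 	newHex = "0b" + newHex
-- 	newHex = int(newHex,2)
-- 	newHex = chr(newHex)
-- 	return(newHex)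
-- ===== SOURCE B (Python) =====
-- def splitHex(hex):
--     n = 0
--     for hexDigit in hex:
--         n = n * 16 + int(hexDigit, 16)
--     return chr(n)
-- ===== Notes on version B (the rewrite author's own statement) =====
-- stated objective: simpler
-- what changed: B accumulates the codepoint directly by Horner's rule (n = n*16 + digit) instead of building a zero-padded binary string per digit and re-parsing it with int(...,2).
import Mathlib
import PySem

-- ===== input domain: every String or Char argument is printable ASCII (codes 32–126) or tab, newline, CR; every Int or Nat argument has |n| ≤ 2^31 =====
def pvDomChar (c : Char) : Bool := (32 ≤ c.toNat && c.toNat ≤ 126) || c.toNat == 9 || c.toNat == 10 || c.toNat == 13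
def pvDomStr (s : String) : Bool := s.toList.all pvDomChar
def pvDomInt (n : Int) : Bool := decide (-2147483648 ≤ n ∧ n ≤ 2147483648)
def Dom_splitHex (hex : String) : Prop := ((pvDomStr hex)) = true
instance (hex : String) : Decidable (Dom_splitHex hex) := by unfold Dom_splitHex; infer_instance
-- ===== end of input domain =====

set_option maxRecDepth 4000

-- B replaces A's per-digit binary-string padding and re-parse with a direct Horner accumulation
-- of the codepoint; return values proved equal on Pre_ (where Python A returns normally).

-- shared helper: Python's int(c, 16) for a single character (none = ValueError)
def pyHexDigit? (c : Char) : Option Nat :=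
  if '0' ≤ c ∧ c ≤ '9' then some (c.toNat - 48)
  else if 'a' ≤ c ∧ c ≤ 'f' then some (c.toNat - 87)
  else if 'A' ≤ c ∧ c ≤ 'F' then some (c.toNat - 55)
  else none

-- ===== PORT A =====
-- temp = bin(temp)[2:] ; pad with '0' to length 4  (Nat.toDigits 2 is Python's bin() without "0b")
def binPad (n : Nat) : List Char :=
  let temp := Nat.toDigits 2 n
  List.replicate (4 - temp.length) '0' ++ temp

def splitHex (hex : String) : String :=
  -- for hexDigit in hex: newHex += padded binary of int(hexDigit,16); none (ValueError) is outside Pre_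
  let newHex : List Char :=
    hex.toList.foldl (fun acc c => acc ++ binPad ((pyHexDigit? c).getD 0)) []
  -- newHex = int("0b" + newHex, 2): parse the binary digit string (empty → ValueError, outside Pre_)
  let n : Nat := newHex.foldl (fun a c => a * 2 + (if c = '1' then 1 else 0)) 0
  -- chr(newHex); invalid codepoints (ValueError / surrogates) are outside Pre_
  String.ofList [Char.ofNat n]

-- ===== PORT B =====
def splitHex_alt (hex : String) : String :=
  let n : Nat := hex.toList.foldl (fun a c => a * 16 + (pyHexDigit? c).getD 0) 0
  String.ofList [Char.ofNat n]

-- ===== PRECONDITION & SPEC =====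
-- numeric value of a hex string (used only to state where Python's chr returns / is representable)
def hexValue (hex : String) : Nat :=
  hex.toList.foldl (fun a c => a * 16 + (pyHexDigit? c).getD 0) 0

-- Pre_ excludes: empty string and non-hex digits (A raises ValueError), values > 0x10FFFF (chr raises
-- ValueError), and surrogate codepoints 0xD800–0xDFFF, where A returns a lone-surrogate str that has
-- no Lean String representation (both Pythons return the same value there).
def Pre_splitHex (hex : String) : Prop :=
  hex ≠ "" ∧ (hex.toList.all fun c => (pyHexDigit? c).isSome) = true ∧
  (hexValue hex < 0xD800 ∨ (0xE000 ≤ hexValue hex ∧ hexValue hex ≤ 0x10FFFF))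
instance (hex : String) : Decidable (Pre_splitHex hex) := by unfold Pre_splitHex; infer_instance

def pvWitness_splitHex : String := "41"

def Spec_splitHex (hex : String) (out : String) : Prop := out = splitHex_alt hex
instance (hex : String) (out : String) : Decidable (Spec_splitHex hex out) := by unfold Spec_splitHex; infer_instance

-- ===== CLAIM (what is proved, stated in full; the proofs are below) =====
def Claim_equal_splitHex : Prop := ∀ (hex : String), Dom_splitHex hex → Pre_splitHex hex → Spec_splitHex hex (splitHex hex)

-- ===== LEMMAS AND PROOFS =====

-- each valid hex digit value is < 16
theorem pyHexDigit?_lt (c : Char) (v : Nat) (h : pyHexDigit? c = some v) : v < 16 := by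
  unfold pyHexDigit? at h
  split_ifs at h with h1 h2 h3 <;>
    simp only [Option.some.injEq] at h <;> subst h <;>
    · obtain ⟨hlo, hhi⟩ := by assumption
      simp only [Char.le_def, UInt32.le_iff_toNat_le, Char.toNat,
        show ('0').val.toNat = 48 from rfl, show ('9').val.toNat = 57 from rfl,
        show ('a').val.toNat = 97 from rfl, show ('f').val.toNat = 102 from rfl,
        show ('A').val.toNat = 65 from rfl, show ('F').val.toNat = 70 from rfl] at hlo hhi ⊢
      omega

-- folding the binary parser over one padded chunk is one base-16 Horner step
theorem chunk_step (a d : Nat) (hd : d < 16) :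
    List.foldl (fun a c => a * 2 + (if c = '1' then 1 else 0)) a (binPad d) = a * 16 + d := by
  interval_cases d <;>
    simp [binPad, Nat.toDigits, Nat.toDigitsCore, Nat.digitChar, List.foldl] <;> omega

-- parsing the concatenation of all padded chunks equals the base-16 Horner fold
theorem parse_flat (l : List Char) (a : Nat)
    (hv : ∀ c ∈ l, (pyHexDigit? c).isSome) :
    List.foldl (fun a c => a * 2 + (if c = '1' then 1 else 0)) a
      (l.flatMap (fun c => binPad ((pyHexDigit? c).getD 0)))
    = List.foldl (fun a c => a * 16 + (pyHexDigit? c).getD 0) a l := by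
  induction l generalizing a with
  | nil => rfl
  | cons c l ih =>
      have hc := hv c (List.mem_cons_self ..)
      obtain ⟨v, hv'⟩ := Option.isSome_iff_exists.mp hc
      simp only [List.flatMap_cons, List.foldl_append, List.foldl_cons]
      rw [chunk_step a _ (by rw [hv']; exact pyHexDigit?_lt c v hv')]
      exact ih _ (fun x hx => hv x (List.mem_cons_of_mem _ hx))

-- A's string-building foldl is the flatMap of the chunks
theorem build_flat (l : List Char) (acc : List Char) :
    List.foldl (fun acc c => acc ++ binPad ((pyHexDigit? c).getD 0)) acc l
    = acc ++ l.flatMap (fun c => binPad ((pyHexDigit? c).getD 0)) := by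
  induction l generalizing acc with
  | nil => simp
  | cons c l ih => simp [ih, List.append_assoc]

-- ===== VERDICT (by name: the statement is the Claim_ definition above) =====
theorem splitHex_spec : Claim_equal_splitHex := by
  intro hex _ hpre
  unfold Spec_splitHex
  simp only [splitHex, splitHex_alt]
  rw [build_flat hex.toList [], List.nil_append, parse_flat _ _ (List.all_eq_true.mp hpre.2.1)]
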